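-- pv_equiv track=rewrite | github.com/Heinz-Garcia/Book-Studio | Sanitizer.py | _remove_double_delimiters
-- ===== SOURCE A (Python) =====
-- def _remove_double_delimiters(body):
--     """Entfernt doppelte --- Trennlinien am Anfang des Body.
--     Der Body kann direkt mit --- oder mit \\n--- starten, je nach Dateistruktur."""
--     changes = []
--
--     # Alle vier möglichen Varianten am Body-Anfang:
--     # 1. Kein Leerzeichen davor, LF:    "---\n..."
--     # 2. Kein Leerzeichen davor, CRLF:  "---\r\n..."
--     # 3. Leerzeile davor, LF:           "\n---\n..."
--     # 4. Leerzeile davor, CRLF:         "\r\n---\r\n..."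
--     for prefix, triple_dash in [
--         ("", "---\n"),
--         ("", "---\r\n"),
--         ("\n", "---\n"),
--         ("\r\n", "---\r\n"),
--     ]:
--         candidate = prefix + triple_dash
--         if body.startswith(candidate):
--             body = prefix + body[len(candidate) :]
--             changes.append("Doppelte '---' Trennlinie nach Frontmatter gelöscht")
--             break
--
--     return body, changes
-- ===== SOURCE B (Python) =====
-- MSG = "Doppelte '---' Trennlinie nach Frontmatter gel\u00f6scht"
--
-- def _remove_double_delimiters(body):
--     """Parse the head of the body instead of testing candidate strings: peel an
--     optional blank-line prefix, split the remainder at the first LF, and accept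
--     when that first line is the delimiter ('---' for LF, '---\r' for CRLF) with
--     a line ending compatible with the peeled prefix."""
--     nl = "\r\n" if body.startswith("\r\n") else "\n" if body.startswith("\n") else ""
--     first, sep, tail = body[len(nl):].partition("\n")
--     if sep and ((first == "---" and nl != "\r\n") or (first == "---\r" and nl != "\n")):
--         return nl + tail, [MSG]
--     return body, []
-- ===== Notes on version B (the rewrite author's own statement) =====
-- stated objective: alternative
-- what changed: Instead of testing four literal candidate prefixes, B parses the head: it peels an optional blank-line prefix, partitions the remainder at the first LF, and accepts when the resulting first line equals the delimiter ('---' or '---\r') with a line ending compatible with the peeled prefix.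
import Mathlib
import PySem

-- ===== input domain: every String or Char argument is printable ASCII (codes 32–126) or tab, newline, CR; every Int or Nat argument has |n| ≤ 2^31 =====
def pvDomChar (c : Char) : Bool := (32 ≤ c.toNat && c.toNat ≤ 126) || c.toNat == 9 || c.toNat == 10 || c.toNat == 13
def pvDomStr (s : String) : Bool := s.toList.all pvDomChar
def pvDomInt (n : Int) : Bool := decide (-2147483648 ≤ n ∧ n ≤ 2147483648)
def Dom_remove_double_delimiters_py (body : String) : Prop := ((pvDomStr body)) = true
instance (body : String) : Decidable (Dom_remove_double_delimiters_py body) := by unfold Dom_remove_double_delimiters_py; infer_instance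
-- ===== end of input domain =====

-- B parses the head (peel optional blank-line prefix, partition at the first LF, compare the
-- first line against the delimiter) instead of testing four candidate strings (objective: alternative).

def pvMsg : String := "Doppelte '---' Trennlinie nach Frontmatter gelöscht"

-- ===== PORT A =====
-- the for-loop with break over the literal candidate table
def pvLoopA : List (String × String) → String → String × List String
  | [], body => (body, [])
  | (pre, td) :: rest, body =>
    let candidate := pre ++ td
    if PySem.Str.startswith body candidate then
      (pre ++ PySem.Str.slice body (some (PySem.Str.len candidate)) none, [pvMsg])
    else pvLoopA rest body

def remove_double_delimiters_py (body : String) : String × List String :=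
  pvLoopA [("", "---\n"), ("", "---\r\n"), ("\n", "---\n"), ("\r\n", "---\r\n")] body

-- ===== PORT B =====
-- str.partition("\n") for the single-character separator, on the char list:
-- (head before first LF, the separator found ("\n") or "" (as a list; truthiness = ≠ []), tail after it)
def pvPartNL : List Char → List Char × List Char × List Char
  | [] => ([], [], [])
  | c :: l =>
    if c = '\n' then ([], ['\n'], l)
    else
      let r := pvPartNL l
      (c :: r.1, r.2.1, r.2.2)

def remove_double_delimiters_py_alt (body : String) : String × List String :=
  let l := body.toList
  -- nl = "\r\n" if body.startswith("\r\n") else "\n" if body.startswith("\n") else ""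
  let nl : List Char :=
    if PySem.Chars.startswith l ['\r', '\n'] then ['\r', '\n']
    else if PySem.Chars.startswith l ['\n'] then ['\n'] else []
  -- body[len(nl):] — nonnegative slice, exact as drop (PySem.List.slice_from_natCast)
  let r := pvPartNL (l.drop nl.length)
  if r.2.1 ≠ [] ∧ ((r.1 = ['-', '-', '-'] ∧ nl ≠ ['\r', '\n']) ∨
                   (r.1 = ['-', '-', '-', '\r'] ∧ nl ≠ ['\n'])) then
    (String.ofList (nl ++ r.2.2), [pvMsg])
  else (body, [])

-- ===== PRECONDITION & SPEC =====
def Spec_remove_double_delimiters_py (body : String) (out : String × List String) : Prop := out = remove_double_delimiters_py_alt body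
instance (body : String) (out : String × List String) : Decidable (Spec_remove_double_delimiters_py body out) := by unfold Spec_remove_double_delimiters_py; infer_instance

-- ===== CLAIM (what is proved, stated in full; the proofs are below) =====
def Claim_equal_remove_double_delimiters_py : Prop := ∀ (body : String), Dom_remove_double_delimiters_py body → Spec_remove_double_delimiters_py body (remove_double_delimiters_py body)

-- ===== LEMMAS AND PROOFS =====

-- partition("\n") either finds no LF (and returns the whole list) or splits at the first LF
theorem pvPartNL_cases (l : List Char) :
    pvPartNL l = (l, [], []) ∨
    (∃ a t, pvPartNL l = (a, ['\n'], t) ∧ l = a ++ '\n' :: t) := by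
  induction l with
  | nil => left; simp [pvPartNL]
  | cons c l ih =>
    by_cases hc : c = '\n'
    · right; exact ⟨[], l, by simp [pvPartNL, hc], by simp [hc]⟩
    · rcases ih with h | ⟨a, t, h1, h2⟩
      · left; simp [pvPartNL, hc, h]
      · right; exact ⟨c :: a, t, by simp [pvPartNL, hc, h1], by simp [h2]⟩

theorem key (l : List Char) :
    remove_double_delimiters_py (String.ofList l) = remove_double_delimiters_py_alt (String.ofList l) := by
  by_cases h1 : ['-', '-', '-', '\n'] <+: l
  · obtain ⟨t, rfl⟩ := h1
    simp [remove_double_delimiters_py, pvLoopA, remove_double_delimiters_py_alt,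
      PySem.Chars.startswith, List.isPrefixOf, pvPartNL,
      PySem.Str.slice, PySem.Str.len, PySem.List.slice_from]
  · by_cases h2 : ['-', '-', '-', '\x0d', '\n'] <+: l
    · obtain ⟨t, rfl⟩ := h2
      simp [remove_double_delimiters_py, pvLoopA, remove_double_delimiters_py_alt,
        PySem.Chars.startswith, List.isPrefixOf, pvPartNL,
        PySem.Str.slice, PySem.Str.len, PySem.List.slice_from]
    · by_cases h3 : ['\n', '-', '-', '-', '\n'] <+: l
      · obtain ⟨t, rfl⟩ := h3
        simp [remove_double_delimiters_py, pvLoopA, remove_double_delimiters_py_alt,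
          PySem.Chars.startswith, List.isPrefixOf, pvPartNL,
          PySem.Str.slice, PySem.Str.len, PySem.List.slice_from]
        rw [show ("\n" : String) = String.ofList ['\n'] from rfl, ← String.ofList_append]
        rfl
      · by_cases h4 : ['\x0d', '\n', '-', '-', '-', '\x0d', '\n'] <+: l
        · obtain ⟨t, rfl⟩ := h4
          simp [remove_double_delimiters_py, pvLoopA, remove_double_delimiters_py_alt,
            PySem.Chars.startswith, List.isPrefixOf, pvPartNL,
            PySem.Str.slice, PySem.Str.len, PySem.List.slice_from]
          rw [show ("\x0d\n" : String) = String.ofList ['\x0d', '\n'] from rfl, ← String.ofList_append]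
          rfl
        · -- no candidate matches: A returns (body, []) and B's condition is refutable
          have ff1 : PySem.Chars.startswith l ['-', '-', '-', '\n'] = false := by
            rw [← Bool.not_eq_true, PySem.Chars.startswith_iff]; exact h1
          have ff2 : PySem.Chars.startswith l ['-', '-', '-', '\x0d', '\n'] = false := by
            rw [← Bool.not_eq_true, PySem.Chars.startswith_iff]; exact h2
          have ff3 : PySem.Chars.startswith l ['\n', '-', '-', '-', '\n'] = false := by
            rw [← Bool.not_eq_true, PySem.Chars.startswith_iff]; exact h3
          have ff4 : PySem.Chars.startswith l ['\x0d', '\n', '-', '-', '-', '\x0d', '\n'] = false := by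
            rw [← Bool.not_eq_true, PySem.Chars.startswith_iff]; exact h4
          rw [show remove_double_delimiters_py (String.ofList l) = (String.ofList l, []) by
            simp [remove_double_delimiters_py, pvLoopA, ff1, ff2, ff3, ff4]]
          by_cases p1 : ['\x0d', '\n'] <+: l
          · obtain ⟨r, rfl⟩ := p1
            rcases pvPartNL_cases r with hp | ⟨a, t, hp, hdec⟩
            · simp [remove_double_delimiters_py_alt, PySem.Chars.startswith, List.isPrefixOf, hp]
            · have ha : a ≠ ['-', '-', '-', '\x0d'] := by
                rintro rfl; exact h4 ⟨t, by simp [hdec]⟩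
              simp [remove_double_delimiters_py_alt, PySem.Chars.startswith, List.isPrefixOf, hp, ha]
          · by_cases p2 : ['\n'] <+: l
            · obtain ⟨r, rfl⟩ := p2
              have hr : ¬ (['\x0d', '\n'] <+: '\n' :: r) := fun h => by
                obtain ⟨u, hu⟩ := h; simp at hu
              have c1 : PySem.Chars.startswith ('\n' :: r) ['\x0d', '\n'] = false := by
                rw [← Bool.not_eq_true, PySem.Chars.startswith_iff]; exact hr
              rcases pvPartNL_cases r with hp | ⟨a, t, hp, hdec⟩
              · simp [remove_double_delimiters_py_alt, PySem.Chars.startswith, List.isPrefixOf, hp]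
              · have ha : a ≠ ['-', '-', '-'] := by
                  rintro rfl; exact h3 ⟨t, by simp [hdec]⟩
                simp [remove_double_delimiters_py_alt, PySem.Chars.startswith, List.isPrefixOf, hp, ha]
            · have c1 : PySem.Chars.startswith l ['\x0d', '\n'] = false := by
                rw [← Bool.not_eq_true, PySem.Chars.startswith_iff]; exact p1
              have c2 : PySem.Chars.startswith l ['\n'] = false := by
                rw [← Bool.not_eq_true, PySem.Chars.startswith_iff]; exact p2
              rcases pvPartNL_cases l with hp | ⟨a, t, hp, hdec⟩
              · simp [remove_double_delimiters_py_alt, c1, c2, hp]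
              · have ha : a ≠ ['-', '-', '-'] := by
                  rintro rfl; exact h1 ⟨t, by simp [hdec]⟩
                have hb : a ≠ ['-', '-', '-', '\x0d'] := by
                  rintro rfl; exact h2 ⟨t, by simp [hdec]⟩
                simp [remove_double_delimiters_py_alt, c1, c2, hp, ha, hb]

-- ===== VERDICT (by name: the statement is the Claim_ definition above) =====
theorem remove_double_delimiters_py_spec : Claim_equal_remove_double_delimiters_py := by
  intro body _
  unfold Spec_remove_double_delimiters_py
  have h := key body.toList
  simpa using h
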